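-- pv_equiv track=rewrite | github.com/SangjinH/algorithm | programmers/line/2021하반기공채/4.py | solution
-- ===== SOURCE A (Python) =====
-- def recur(arr, primes_nums):
--     if len(arr) == 1:
--         return arr
--
--     for i in range(len(primes_nums)):
--         if len(arr) % primes_nums[i] == 0:
--             new_arr = [[] for _ in range(primes_nums[i])]
--
--             for j in range(len(arr)):
--                 new_arr[j%primes_nums[i]].append(arr[j])
--             break
--
--     result = []
--     for i in range(len(new_arr)):
--         result += recur(new_arr[i], primes_nums)
--
--     return result
--
-- def solution(n):
--     primes = [True] * 1000001
--
--     for i in range(2, int((1000001)**(1/2))+1):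
--         if primes[i]:
--             for j in range(2*i, len(primes), i):
--                 primes[j] = False
--
--     prime_nums = []
--     for i in range(2, len(primes)-1):
--         if primes[i]:
--             prime_nums.append(i)
--
--     arr = [i for i in range(1, n+1)]
--
--     return recur(arr, prime_nums)
-- ===== SOURCE B (Python) =====
-- def solution(n):
--     # Level-by-level radix split: keep the current list of blocks (all the same
--     # length); repeatedly split every block into its p residue-strides, where p
--     # is the smallest divisor >= 2 of the block length.
--     blocks = [list(range(1, n + 1))]
--     while len(blocks[0]) > 1:
--         L = len(blocks[0])
--         p = next(d for d in range(2, L + 1) if L % d == 0)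
--         blocks = [[b[j] for j in range(r, len(b), p)] for b in blocks for r in range(p)]
--     return [b[0] for b in blocks]
-- ===== Notes on version B (the rewrite author's own statement) =====
-- stated objective: alternative
-- what changed: Replaces the 10^6 Eratosthenes sieve plus depth-first recursive bucketing by an iterative level-by-level split: keep the list of equal-length blocks, find the smallest divisor p of the block length by trial division, replace each block by its p residue strides, and finally read off the single-element blocks.
import Mathlib
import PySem

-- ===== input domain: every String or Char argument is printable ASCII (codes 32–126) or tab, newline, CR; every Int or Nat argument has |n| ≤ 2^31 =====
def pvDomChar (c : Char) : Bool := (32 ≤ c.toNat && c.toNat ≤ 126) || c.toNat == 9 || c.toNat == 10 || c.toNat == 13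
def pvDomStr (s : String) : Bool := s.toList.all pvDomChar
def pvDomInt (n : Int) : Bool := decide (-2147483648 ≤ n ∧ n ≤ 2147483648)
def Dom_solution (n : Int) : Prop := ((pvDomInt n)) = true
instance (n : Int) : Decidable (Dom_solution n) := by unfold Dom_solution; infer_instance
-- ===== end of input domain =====

-- B replaces A's per-call 10^6 sieve and depth-first recursive bucketing by an iterative
-- level-by-level split with trial-division smallest-factor search (objective: alternative).

-- ===== PORT A =====
-- primes = [True]*1000001; for i in range(2, int(1000001**0.5)+1): if primes[i]: for j in range(2*i, len(primes), i): primes[j] = False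
-- (int((1000001)**(1/2))+1 evaluates to 1001 in Python; the bool list is ported as Array Bool, index set = set!)
def solutionSieve : Array Bool :=
  (PySem.List.pyRange 2 1001 1).foldl
    (fun primes i =>
      if primes.getD i.toNat true then
        (PySem.List.pyRange (2 * i) 1000001 i).foldl (fun pr j => pr.set! j.toNat false) primes
      else primes)
    (Array.replicate 1000001 true)

-- prime_nums = []; for i in range(2, len(primes)-1): if primes[i]: prime_nums.append(i)
-- (the append-only accumulator is built by consing and a final reverse, the standard
--  constant-time port of list.append in a loop)
def solutionPrimes : List Int :=
  let primes := solutionSieve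
  ((PySem.List.pyRange 2 1000000 1).foldl
    (fun acc i => if primes.getD i.toNat true then i :: acc else acc) []).reverse

-- recur(arr, primes_nums); the fuel argument only makes the recursion structural: on every
-- input admitted by Pre_solution the fuel is never exhausted (the 0-fuel branch and the
-- 'none' branch correspond to Python's RecursionError / NameError, excluded by Pre_solution).
def recurA : Nat → List Int → List Int → List Int
  | 0, _, _ => []
  | fuel + 1, arr, primesNums =>
    if arr.length == 1 then arr
    else
      -- for i in range(len(primes_nums)): if len(arr) % primes_nums[i] == 0: … break
      match primesNums.find? (fun p => PySem.Int.mod (arr.length : Int) p == 0) with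
      | none => []  -- Python: new_arr undefined → NameError (outside Pre_solution)
      | some p =>
        -- new_arr = [[] for _ in range(p)]; for j in range(len(arr)): new_arr[j%p].append(arr[j])
        let newArr : List (List Int) :=
          (List.range arr.length).foldl
            (fun na j => na.set (j % p.toNat) (na.getD (j % p.toNat) [] ++ [arr.getD j 0]))
            (List.replicate p.toNat [])
        -- result = []; for i in range(len(new_arr)): result += recur(new_arr[i], primes_nums)
        newArr.foldl (fun result b => result ++ recurA fuel b primesNums) []

def solution (n : Int) : List Int :=
  recurA (n.toNat + 1) (PySem.List.pyRange 1 (n + 1) 1) solutionPrimes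

-- ===== PORT B =====
-- p = next(d for d in range(2, L + 1) if L % d == 0)
def spfB (L : Int) : Option Int :=
  (PySem.List.pyRange 2 (L + 1) 1).find? (fun d => PySem.Int.mod L d == 0)

-- [b[j] for j in range(r, len(b), p)]
def strideB (b : List Int) (r p : Int) : List Int :=
  (PySem.List.pyRange r (b.length : Int) p).map (fun j => PySem.List.pyGetD b j 0)

-- while len(blocks[0]) > 1: … (fuel only makes the loop structural; never exhausted under Pre_solution)
def loopB : Nat → List (List Int) → List (List Int)
  | 0, blocks => blocks
  | fuel + 1, blocks =>
    let L : Int := ((blocks.headD []).length : Int)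
    if 1 < L then
      match spfB L with
      | none => blocks  -- unreachable: every L ≥ 2 has a divisor d = L
      | some p =>
        loopB fuel (blocks.flatMap (fun b => (PySem.List.pyRange 0 p 1).map (fun r => strideB b r p)))
    else blocks

def solution_alt (n : Int) : List Int :=
  (loopB (n.toNat + 1) [PySem.List.pyRange 1 (n + 1) 1]).map (fun b => PySem.List.pyGetD b 0 0)

-- ===== PRECONDITION & SPEC =====
-- Pre_solution excludes only inputs on which A raises: for n ≤ 0 recur recurses forever on []
-- (RecursionError), and when n has a prime factor ≥ 10^6 some recursion level's length has no
-- divisor in prime_nums, so new_arr is unbound (NameError).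
-- (second conjunct = every prime factor of n is < 10^6, phrased over the small cofactor
--  m = 47*a+b ≤ 2161 = n/q — within Dom, q ≥ 10^6 forces m ≤ 2147 — which must leave a
--  composite quotient, witnessed by a proper divisor d = 216*x+y ≤ 46439 > sqrt(2^31);
--  the ranges are split in two to keep the decision procedure's recursion shallow)
def Pre_solution (n : Int) : Prop :=
  1 ≤ n ∧ ∀ a ∈ List.range 46, ∀ b ∈ List.range 47,
    1 ≤ 47 * a + b → (47 * a + b) ∣ n.toNat →
      n.toNat / (47 * a + b) < 1000000 ∨
      ∃ x ∈ List.range 215, ∃ y ∈ List.range 216,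
        2 ≤ 216 * x + y ∧ (216 * x + y) ∣ n.toNat / (47 * a + b) ∧
          216 * x + y < n.toNat / (47 * a + b)
instance (n : Int) : Decidable (Pre_solution n) := by unfold Pre_solution; infer_instance

def pvWitness_solution : Int := (12)

def Spec_solution (n : Int) (out : List Int) : Prop := out = solution_alt n
instance (n : Int) (out : List Int) : Decidable (Spec_solution n out) := by unfold Spec_solution; infer_instance

-- ===== CLAIM (what is proved, stated in full; the proofs are below) =====
def Claim_equal_solution : Prop := ∀ (n : Int), Dom_solution n → Pre_solution n → Spec_solution n (solution n)

-- ===== LEMMAS AND PROOFS =====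

-- every prime factor of L is below the sieve bound
def pvSmooth (L : Nat) : Prop := ∀ q : Nat, Nat.Prime q → q ∣ L → q < 1000000

-- the r-th stride of arr with step p, as plain Nat indexing
def strideSpec (arr : List Int) (r p : Nat) : List Int :=
  (List.range (arr.length / p)).map (fun k => arr.getD (r + p * k) 0)

-- indices cleared by the inner sieve loop are proper multiples, hence not prime
theorem mark_not_prime (i j : Int) (hi : 2 ≤ i) (hj : j ∈ PySem.List.pyRange (2 * i) 1000001 i) :
    ¬ Nat.Prime j.toNat := by
  rw [PySem.List.mem_pyRange_iff_of_pos (by omega)] at hj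
  obtain ⟨h1, _, m, hm⟩ := hj
  have hexp : i * (m + 2) = i * m + 2 * i := by ring
  have hj' : j = i * (m + 2) := by omega
  have him : 0 ≤ i * m := by omega
  have hm2 : (2:Int) ≤ m + 2 := by nlinarith
  have hi0 : (0:Int) ≤ i := by omega
  have hm0 : (0:Int) ≤ m + 2 := by omega
  have : j.toNat = i.toNat * (m + 2).toNat := by
    rw [hj', Int.toNat_mul hi0 hm0]
  rw [this]
  exact Nat.not_prime_mul (by omega) (by omega)

theorem getD_set!_ne (a : Array Bool) (i q : Nat) (v : Bool) (hne : i ≠ q) (d : Bool) :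
    (a.set! i v).getD q d = a.getD q d := by
  simp [Array.set!, Array.getD_eq_getD_getElem?, hne]

-- (1) the sieve never clears a prime index
theorem sieve_prime_true (q : Nat) (hq : Nat.Prime q) : solutionSieve.getD q true = true := by
  unfold solutionSieve
  refine List.foldlRecOn (motive := fun (a : Array Bool) => a.getD q true = true) _ _ (by simp [Array.getD]) ?_
  intro a ha i hi
  have hi2 : 2 ≤ i := ((PySem.List.mem_pyRange_one).1 hi).1
  split
  · refine List.foldlRecOn (motive := fun (a : Array Bool) => a.getD q true = true) _ _ ha ?_
    intro b hb j hj
    have hnp : ¬ Nat.Prime j.toNat := mark_not_prime i j hi2 hj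
    have hne : j.toNat ≠ q := fun h => hnp (h ▸ hq)
    rw [getD_set!_ne b j.toNat q false hne]
    exact hb
  · exact ha

-- (2) the collection loop is a filter of the range
theorem foldl_cons_if_rev (p : Int → Bool) (l : List Int) :
    ∀ acc : List Int,
      l.foldl (fun acc x => if p x then x :: acc else acc) acc = (l.filter p).reverse ++ acc := by
  induction l with
  | nil => intro acc; simp
  | cons x t ih =>
    intro acc
    by_cases hx : p x <;> simp [hx, ih]

theorem primes_eq :
    solutionPrimes
      = (PySem.List.pyRange 2 1000000 1).filter (fun i => solutionSieve.getD i.toNat true) := by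
  unfold solutionPrimes
  show ((PySem.List.pyRange 2 1000000 1).foldl
      (fun acc i => if solutionSieve.getD i.toNat true then i :: acc else acc) []).reverse = _
  rw [foldl_cons_if_rev]
  simp

theorem primes_mem (q : Nat) (hq : Nat.Prime q) (hlt : q < 1000000) :
    (q : Int) ∈ solutionPrimes := by
  rw [primes_eq, List.mem_filter]
  constructor
  · rw [PySem.List.mem_pyRange_one]
    have := hq.two_le
    omega
  · simpa using sieve_prime_true q hq

theorem primes_ge (x : Int) (hx : x ∈ solutionPrimes) : 2 ≤ x := by
  rw [primes_eq, List.mem_filter] at hx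
  exact ((PySem.List.mem_pyRange_one).1 hx.1).1

theorem primes_sorted : solutionPrimes.Pairwise (· < ·) := by
  rw [primes_eq]
  exact (PySem.List.pairwise_lt_pyRange_one 2 1000000).filter _

-- (3) on an ascending list of ints ≥ 2 that contains minFac L, the first divisor found is minFac L
theorem find_first_div (l : List Int) (L : Nat)
    (hmem : ((L.minFac : Nat) : Int) ∈ l) (hge : ∀ x ∈ l, 2 ≤ x)
    (hsort : l.Pairwise (· < ·)) :
    l.find? (fun d => PySem.Int.mod (L : Int) d == 0) = some ((L.minFac : Nat) : Int) := by
  induction l with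
  | nil => simp at hmem
  | cons h t ih =>
    by_cases hdiv : PySem.Int.mod (L : Int) h = 0
    · have hdvd : h ∣ (L : Int) := (PySem.Int.mod_eq_zero_iff_dvd _ _).1 hdiv
      have hh2 : 2 ≤ h := hge h (List.mem_cons_self ..)
      have hhA : ((h.toNat : Nat) : Int) = h := Int.toNat_of_nonneg (by omega)
      have hdvdN : h.toNat ∣ L := by
        rw [← Int.natCast_dvd_natCast, hhA]; exact hdvd
      have hle : L.minFac ≤ h.toNat := Nat.minFac_le_of_dvd (by omega) hdvdN
      have heq : ((L.minFac : Nat) : Int) = h := by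
        rcases List.mem_cons.1 hmem with hc | hc
        · exact hc
        · exfalso
          have := (List.pairwise_cons.1 hsort).1 _ hc
          omega
      rw [List.find?_cons_of_pos (p := fun d => PySem.Int.mod (L : Int) d == 0) (by simpa using hdiv), heq]
    · have hmf : PySem.Int.mod (L : Int) ((L.minFac : Nat) : Int) = 0 := by
        rw [PySem.Int.mod_eq_zero_iff_dvd]
        exact_mod_cast Int.natCast_dvd_natCast.2 L.minFac_dvd
      have hne : ((L.minFac : Nat) : Int) ≠ h := fun he => hdiv (he ▸ hmf)
      have hmem' : ((L.minFac : Nat) : Int) ∈ t := by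
        rcases List.mem_cons.1 hmem with hc | hc
        · exact absurd hc hne
        · exact hc
      rw [List.find?_cons_of_neg (p := fun d => PySem.Int.mod (L : Int) d == 0) (by simpa using hdiv)]
      exact ih hmem' (fun x hx => hge x (List.mem_cons_of_mem _ hx)) (List.Pairwise.of_cons hsort)

theorem findA (L : Nat) (h2 : 2 ≤ L) (hs : pvSmooth L) :
    solutionPrimes.find? (fun p => PySem.Int.mod (L : Int) p == 0) = some ((L.minFac : Nat) : Int) := by
  have hpf : Nat.Prime L.minFac := Nat.minFac_prime (by omega)
  exact find_first_div _ L (primes_mem _ hpf (hs _ hpf L.minFac_dvd)) primes_ge primes_sorted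

theorem findB (L : Nat) (h2 : 2 ≤ L) :
    spfB (L : Int) = some ((L.minFac : Nat) : Int) := by
  have hpf : Nat.Prime L.minFac := Nat.minFac_prime (by omega)
  have hle : L.minFac ≤ L := Nat.minFac_le (by omega)
  unfold spfB
  refine find_first_div _ L ?_ ?_ (PySem.List.pairwise_lt_pyRange_one 2 ((L : Int) + 1))
  · rw [PySem.List.mem_pyRange_one]
    have := hpf.two_le
    omega
  · intro x hx
    exact ((PySem.List.mem_pyRange_one).1 hx).1

-- (4) B's stride is strideSpec
theorem strideB_eq (arr : List Int) (r p : Nat) (hp : 0 < p) (hr : r < p) (hd : p ∣ arr.length) :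
    strideB arr (r : Int) (p : Int) = strideSpec arr r p := by
  obtain ⟨q, hq⟩ := hd
  unfold strideB strideSpec
  rw [PySem.List.pyRange_of_pos _ _ (by exact_mod_cast hp), hq]
  rcases Nat.eq_zero_or_pos q with hq0 | hq0
  · subst hq0
    simp
  · have hcond : (r : Int) < ((p * q : Nat) : Int) := by
      have : p * 1 ≤ p * q := Nat.mul_le_mul_left p hq0
      push_cast
      omega
    rw [if_pos hcond]
    have hcnt : ((((p * q : Nat) : Int) - (r : Int) + (p : Int) - 1) / (p : Int)).toNat = q := by
      have hrw : (((p * q : Nat) : Int) - (r : Int) + (p : Int) - 1)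
          = ((p : Int) - 1 - (r : Int)) + (q : Int) * (p : Int) := by push_cast; ring
      rw [hrw, Int.add_mul_ediv_right _ _ (by omega : (p : Int) ≠ 0),
        Int.ediv_eq_zero_of_lt (by omega) (by omega)]
      omega
    rw [hcnt, List.map_map, Nat.mul_div_cancel_left q hp]
    apply List.map_congr_left
    intro k _
    have h0 : (0 : Int) ≤ (r : Int) + (p : Int) * (k : Int) := by positivity
    simp only [Function.comp]
    rw [PySem.List.pyGetD_of_nonneg _ _ h0]
    congr 1

theorem length_strideSpec (arr : List Int) (r p : Nat) :
    (strideSpec arr r p).length = arr.length / p := by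
  simp [strideSpec]

-- (5) A's bucket fold produces exactly the strides
theorem filter_mod_range (p q r : Nat) (hr : r < p) :
    (List.range (p * q)).filter (fun j => j % p == r) = (List.range q).map (fun k => r + p * k) := by
  induction q with
  | zero => simp
  | succ q ih =>
    have hmul : p * (q + 1) = p * q + p := by ring
    rw [hmul, List.range_add, List.filter_append, ih, List.range_succ, List.map_append]
    congr 1
    rw [List.filter_map]
    have hc : ∀ x ∈ List.range p,
        ((fun j => j % p == r) ∘ (fun x => p * q + x)) x = (x == r) := by
      intro x hx
      have hxp : x < p := List.mem_range.1 hx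
      simp [Function.comp, Nat.mod_eq_of_lt hxp]
    rw [List.filter_congr hc]
    have : (List.range p).filter (fun x => x == r) = [r] := by
      have := List.filter_eq (l := List.range p) r
      simp only [List.count_range, hr, if_true] at this
      simpa using this
    rw [this]
    simp [Nat.add_comm]

theorem bucket_eq (arr : List Int) (p : Nat) (hp : 0 < p) (hd : p ∣ arr.length) :
    (List.range arr.length).foldl
        (fun na j => na.set (j % p) (na.getD (j % p) [] ++ [arr.getD j 0]))
        (List.replicate p [])
      = (List.range p).map (fun r => strideSpec arr r p) := by
  have inv : ∀ m : Nat,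
      (List.range m).foldl
          (fun na j => na.set (j % p) (na.getD (j % p) [] ++ [arr.getD j 0]))
          (List.replicate p [])
        = (List.range p).map
            (fun s => ((List.range m).filter (fun j => j % p == s)).map (fun j => arr.getD j 0)) := by
    intro m
    induction m with
    | zero => simp [List.map_const']
    | succ m ih =>
      rw [List.range_succ, List.foldl_append, ih]
      apply List.ext_getElem
      · simp
      · intro i h1 h2
        have hip : i < p := by simpa using h2
        have hmp : m % p < p := Nat.mod_lt _ hp
        have hget : ((List.range p).map
            (fun s => ((List.range m).filter (fun j => j % p == s)).map (fun j => arr.getD j 0))).getD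
              (m % p) []
            = ((List.range m).filter (fun j => j % p == m % p)).map (fun j => arr.getD j 0) := by
          rw [List.getD_eq_getElem _ _ (by simpa using hmp)]
          simp
        simp only [List.foldl_cons, List.foldl_nil, hget]
        rw [List.getElem_set]
        by_cases he : m % p = i
        · simp [he, List.filter_append]
        · simp [he, List.filter_append]
  obtain ⟨q, hq⟩ := hd
  rw [inv arr.length]
  apply List.map_congr_left
  intro s hs
  have hsp : s < p := List.mem_range.1 hs
  rw [hq, filter_mod_range p q s hsp]
  unfold strideSpec
  rw [hq, Nat.mul_div_cancel_left q hp, List.map_map]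
  rfl

-- blocks of length 1 are returned as-is by recur
theorem flatMap_recurA_ones (f : Nat) (pn : List Int) (blocks : List (List Int))
    (h : ∀ b ∈ blocks, b.length = 1) :
    blocks.flatMap (fun b => recurA (f + 1) b pn) = blocks.map (fun b => PySem.List.pyGetD b 0 0) := by
  induction blocks with
  | nil => rfl
  | cons b rest ih =>
    obtain ⟨x, hx⟩ := List.length_eq_one_iff.1 (h b (by simp))
    subst hx
    rw [List.flatMap_cons, List.map_cons, ih (fun c hc => h c (List.mem_cons_of_mem _ hc))]
    simp [recurA, PySem.List.pyGetD]

-- one recursion step of A unfolds to the strides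
theorem recurA_step (f : Nat) (b : List Int) (h2 : 2 ≤ b.length) (hsm : pvSmooth b.length) :
    recurA (f + 1) b solutionPrimes
      = ((List.range b.length.minFac).map (fun r => strideSpec b r b.length.minFac)).flatMap
          (fun c => recurA f c solutionPrimes) := by
  rw [recurA]
  rw [if_neg (by simp; omega)]
  rw [findA b.length h2 hsm]
  simp only [Int.toNat_natCast]
  rw [bucket_eq b b.length.minFac (Nat.minFac_prime (by omega)).pos b.length.minFac_dvd]
  rw [PySem.List.foldl_append_eq_flatMap]
  simp

-- (6) the main level-vs-recursion correspondence
theorem main_level (fuel : Nat) :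
    ∀ (L : Nat) (blocks : List (List Int)), 1 ≤ L → L ≤ fuel → pvSmooth L →
      (∀ b ∈ blocks, b.length = L) →
      (loopB fuel blocks).map (fun b => PySem.List.pyGetD b 0 0)
        = blocks.flatMap (fun b => recurA fuel b solutionPrimes) := by
  induction fuel with
  | zero => intro L blocks h1 hle _ _; omega
  | succ f ih =>
    intro L blocks h1 hle hsm hlen
    rcases blocks with _ | ⟨b0, rest⟩
    · simp [loopB]
    · by_cases hL1 : L = 1
      · subst hL1
        have hb0 : b0.length = 1 := hlen b0 (by simp)
        rw [loopB]
        simp only [List.headD_cons, hb0]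
        norm_num
        exact (flatMap_recurA_ones f _ _ hlen).symm
      · have h2 : 2 ≤ L := by omega
        have hb0 : b0.length = L := hlen b0 (by simp)
        have hpp : Nat.Prime L.minFac := Nat.minFac_prime (by omega)
        have hpd : L.minFac ∣ L := L.minFac_dvd
        have hp2 : 2 ≤ L.minFac := hpp.two_le
        have hLp1 : 1 ≤ L / L.minFac := (Nat.one_le_div_iff (by omega)).2 (Nat.le_of_dvd (by omega) hpd)
        have hLplt : L / L.minFac < L := Nat.div_lt_self (by omega) (by omega)
        have hsm' : pvSmooth (L / L.minFac) :=
          fun q hq hdvd => hsm q hq (hdvd.trans (Nat.div_dvd_of_dvd hpd))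
        have hconv : ∀ b ∈ b0 :: rest,
            (PySem.List.pyRange 0 ((L.minFac : Nat) : Int) 1).map
                (fun r => strideB b r ((L.minFac : Nat) : Int))
              = (List.range L.minFac).map (fun r => strideSpec b r L.minFac) := by
          intro b hb
          rw [PySem.List.pyRange_one]
          rw [List.map_map]
          simp only [Int.sub_zero, Int.toNat_natCast]
          apply List.map_congr_left
          intro r hr
          have hrp : r < L.minFac := List.mem_range.1 hr
          have : (0 : Int) + (r : Nat) = ((r : Nat) : Int) := by omega
          simp only [Function.comp, this]
          exact strideB_eq b r L.minFac (by omega) hrp (hlen b hb ▸ hpd)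
        rw [loopB]
        simp only [List.headD_cons, hb0]
        rw [if_pos (by exact_mod_cast h2 : (1 : Int) < ((L : Nat) : Int))]
        rw [findB L h2]
        simp only []
        rw [List.flatMap_def, List.map_congr_left hconv, ← List.flatMap_def]
        rw [ih (L / L.minFac) _ hLp1 (by omega) hsm' ?hlens]
        case hlens =>
          intro c hc
          obtain ⟨b, hb, hc⟩ := List.mem_flatMap.1 hc
          obtain ⟨r, _, hcr⟩ := List.mem_map.1 hc
          rw [← hcr, length_strideSpec, hlen b hb]
        have hstep : ∀ b ∈ b0 :: rest,
            recurA (f + 1) b solutionPrimes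
              = ((List.range L.minFac).map (fun r => strideSpec b r L.minFac)).flatMap
                  (fun c => recurA f c solutionPrimes) := by
          intro b hb
          have hbl : b.length = L := hlen b hb
          have := recurA_step f b (by omega) (by rw [hbl]; exact hsm)
          rw [hbl] at this
          exact this
        rw [List.flatMap_assoc]
        rw [List.flatMap_def (l := b0 :: rest), List.flatMap_def (l := b0 :: rest)]
        congr 1
        exact (List.map_congr_left hstep).symm

-- ===== VERDICT (by name: the statement is the Claim_ definition above) =====
theorem solution_spec : Claim_equal_solution := by
  intro n hdom hpre
  obtain ⟨hn1, hfac⟩ := hpre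
  unfold Dom_solution pvDomInt at hdom
  have hdd : -2147483648 ≤ n ∧ n ≤ 2147483648 := of_decide_eq_true hdom
  unfold Spec_solution solution solution_alt
  have hn0 : n.toNat ≠ 0 := by omega
  have hNle : n.toNat ≤ 2147483648 := by omega
  have hsm' : pvSmooth n.toNat := by
    intro q hq hdvd
    by_contra hge
    push Not at hge
    obtain ⟨c, hc⟩ := hdvd
    have hq0 : 0 < q := hq.pos
    have hc1 : 1 ≤ c := by
      rcases Nat.eq_zero_or_pos c with h | h
      · subst h; simp at hc; omega
      · exact h
    have hcle : c ≤ 2147 := by nlinarith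
    have hcd : c ∣ n.toNat := ⟨q, by rw [hc, Nat.mul_comm]⟩
    have hdivc : n.toNat / c = q := by
      rw [hc, Nat.mul_div_cancel _ (by omega)]
    have hcsplit : c = 47 * (c / 47) + c % 47 := by omega
    rcases hfac (c / 47) (List.mem_range.2 (by omega)) (c % 47) (List.mem_range.2 (by omega))
        (by omega) (by rw [← hcsplit]; exact hcd) with h | ⟨x, _, y, _, hd2, hddvd, hdlt⟩
    · rw [← hcsplit, hdivc] at h; omega
    · rw [← hcsplit, hdivc] at hddvd hdlt
      rcases hq.eq_one_or_self_of_dvd _ hddvd with h | h <;> omega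
  have harr : (PySem.List.pyRange 1 (n + 1) 1).length = n.toNat := by
    rw [PySem.List.length_pyRange_one]
    omega
  have h := main_level (n.toNat + 1) n.toNat [PySem.List.pyRange 1 (n + 1) 1]
    (by omega) (by omega) hsm' (by intro b hb; rw [List.mem_singleton.1 hb, harr])
  rw [List.flatMap_cons, List.flatMap_nil, List.append_nil] at h
  exact h.symm
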